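-- pv_equiv track=rewrite | github.com/takuphilchan/Micro-Expression-Recognition | data_preprocessing_gui/process_dataset_module.py | dynamic_select_frames
-- ===== SOURCE A (Python) =====
-- def dynamic_select_frames(onset, apex, offset, window_size, sparse_rate):
--     selected_frames = set()
--
--     # Total frames is the range from onset to offset
--     # total_frames = offset - onset + 1
--
--     # Add frames within the window around onset
--     for i in range(onset, min(onset + window_size + 1, offset + 1)):
--         selected_frames.add(i)
--
--     # Add frames within the window around apex
--     for i in range(max(apex - window_size, onset), min(apex + window_size + 1, offset + 1)):
--         selected_frames.add(i)
--
--     # Add frames within the window around offset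
--     for i in range(max(offset - window_size, onset), offset + 1):
--         selected_frames.add(i)
--
--     # Sparse sampling outside the windows
--     for i in range(onset, offset + 1):
--         if i not in selected_frames and (i - onset) % sparse_rate == 0:
--             selected_frames.add(i)
--
--     # Sort the selected frames
--     selected_frames = sorted(selected_frames)
--
--     return selected_frames
-- ===== SOURCE B (Python) =====
-- def dynamic_select_frames(onset, apex, offset, window_size, sparse_rate):
--     # one pass: emit each frame that lies in a window or on the sparse grid;
--     # output is sorted by construction, no set needed
--     def keep(i):
--         return (i - onset <= window_size
--                 or abs(i - apex) <= window_size
--                 or offset - i <= window_size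
--                 or (i - onset) % sparse_rate == 0)
--     return [i for i in range(onset, offset + 1) if keep(i)]
-- ===== Notes on version B (the rewrite author's own statement) =====
-- stated objective: simpler
-- what changed: B replaces A's set-union of three window ranges plus a sparse-sampling scan followed by a sort with a single filtered pass over range(onset, offset+1) using a direct per-frame predicate (window distance tests or divisibility), producing the sorted list directly with no set and no sort.
-- outside the precondition, e.g. on dynamic_select_frames(0, 1, 2, 5, 0): A returns [0, 1, 2], B returns [0, 1, 2]
import Mathlib
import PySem

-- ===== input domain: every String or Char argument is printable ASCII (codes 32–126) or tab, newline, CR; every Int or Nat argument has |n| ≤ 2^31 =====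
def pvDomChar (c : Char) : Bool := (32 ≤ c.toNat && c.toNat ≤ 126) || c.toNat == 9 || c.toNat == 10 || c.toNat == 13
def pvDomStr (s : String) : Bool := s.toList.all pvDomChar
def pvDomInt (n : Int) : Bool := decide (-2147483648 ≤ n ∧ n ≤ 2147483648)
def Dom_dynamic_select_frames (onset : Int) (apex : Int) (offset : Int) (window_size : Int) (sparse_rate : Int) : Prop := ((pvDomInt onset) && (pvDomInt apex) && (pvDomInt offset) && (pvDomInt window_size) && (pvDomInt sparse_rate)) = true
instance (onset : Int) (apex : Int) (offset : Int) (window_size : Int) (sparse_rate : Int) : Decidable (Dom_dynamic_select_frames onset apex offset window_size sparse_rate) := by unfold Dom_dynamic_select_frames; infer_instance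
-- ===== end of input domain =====

-- B makes a single filtered pass over range(onset, offset+1) with a direct per-frame predicate
-- (window-distance tests or sparse divisibility), yielding the sorted result with no set and no
-- sort, instead of A's set-union of window ranges plus a sparse scan followed by sorted()
-- (objective: simpler).

-- ===== PORT A =====
def dynamic_select_frames (onset : Int) (apex : Int) (offset : Int) (window_size : Int) (sparse_rate : Int) : List Int :=
  -- selected_frames = set(); three window loops adding each i; then the sparse-sampling loop; then sorted
  let s : PySem.Set Int := PySem.Set.empty
  let s := PySem.Set.update s (PySem.List.pyRange onset (min (onset + window_size + 1) (offset + 1)) 1)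
  let s := PySem.Set.update s (PySem.List.pyRange (max (apex - window_size) onset) (min (apex + window_size + 1) (offset + 1)) 1)
  let s := PySem.Set.update s (PySem.List.pyRange (max (offset - window_size) onset) (offset + 1) 1)
  let s := (PySem.List.pyRange onset (offset + 1) 1).foldl
    (fun acc i =>
      if !(PySem.Set.contains acc i) && (PySem.Int.mod (i - onset) sparse_rate == 0)
      then PySem.Set.add acc i else acc) s
  PySem.List.sorted s (fun x => x) false

-- ===== PORT B =====
def dynamic_select_frames_alt (onset : Int) (apex : Int) (offset : Int) (window_size : Int) (sparse_rate : Int) : List Int :=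
  -- [i for i in range(onset, offset + 1) if keep(i)]
  (PySem.List.pyRange onset (offset + 1) 1).filter (fun i =>
    decide (i - onset ≤ window_size) || decide (|i - apex| ≤ window_size) ||
    decide (offset - i ≤ window_size) || (PySem.Int.mod (i - onset) sparse_rate == 0))

-- ===== PRECONDITION & SPEC =====
-- Pre_ excludes sparse_rate = 0: there Python's '% 0' raises ZeroDivisionError (in A and in B alike)
-- on any frame not short-circuited away by the window tests; on the remaining inputs whose every
-- frame lies in a window both programs return the same list, an accidental corner of short-circuiting.
def Pre_dynamic_select_frames (onset : Int) (apex : Int) (offset : Int) (window_size : Int) (sparse_rate : Int) : Prop := sparse_rate ≠ 0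
instance (onset : Int) (apex : Int) (offset : Int) (window_size : Int) (sparse_rate : Int) : Decidable (Pre_dynamic_select_frames onset apex offset window_size sparse_rate) := by unfold Pre_dynamic_select_frames; infer_instance

def pvWitness_dynamic_select_frames : Int × Int × Int × Int × Int := (0, 3, 10, 1, 3)

def Spec_dynamic_select_frames (onset : Int) (apex : Int) (offset : Int) (window_size : Int) (sparse_rate : Int) (out : List Int) : Prop := out = dynamic_select_frames_alt onset apex offset window_size sparse_rate
instance (onset : Int) (apex : Int) (offset : Int) (window_size : Int) (sparse_rate : Int) (out : List Int) : Decidable (Spec_dynamic_select_frames onset apex offset window_size sparse_rate out) := by unfold Spec_dynamic_select_frames; infer_instance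

-- ===== CLAIM (what is proved, stated in full; the proofs are below) =====
def Claim_equal_dynamic_select_frames : Prop := ∀ (onset : Int) (apex : Int) (offset : Int) (window_size : Int) (sparse_rate : Int), Dom_dynamic_select_frames onset apex offset window_size sparse_rate → Pre_dynamic_select_frames onset apex offset window_size sparse_rate → Spec_dynamic_select_frames onset apex offset window_size sparse_rate (dynamic_select_frames onset apex offset window_size sparse_rate)

-- ===== LEMMAS AND PROOFS =====

-- membership through A's sparse-sampling loop: the 'not already selected' test does not affect membership
theorem mem_foldl_condAdd (p : Int → Bool) (l : List Int) (s : PySem.Set Int) (y : Int) :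
    y ∈ l.foldl (fun acc i => if !(PySem.Set.contains acc i) && p i then PySem.Set.add acc i else acc) s
      ↔ y ∈ s ∨ (y ∈ l ∧ p y = true) := by
  induction l generalizing s with
  | nil => simp
  | cons h t ih =>
    have hstep : ∀ z, z ∈ (if !(PySem.Set.contains s h) && p h then PySem.Set.add s h else s)
        ↔ z ∈ s ∨ (z = h ∧ p h = true) := by
      intro z
      by_cases hc : PySem.Set.contains s h = true
      · have hm : h ∈ s := (PySem.Set.contains_iff s h).mp hc
        simp only [hc, Bool.not_true, Bool.false_and, Bool.false_eq_true, if_false]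
        constructor
        · exact Or.inl
        · rintro (hz | ⟨rfl, _⟩); exacts [hz, hm]
      · by_cases hp : p h = true
        · simp only [hc, hp, Bool.not_false, Bool.and_self, if_true, PySem.Set.mem_add]
          tauto
        · simp only [hc, Bool.not_false, Bool.true_and, hp, Bool.false_eq_true, if_false]
          tauto
    simp only [List.foldl_cons, ih, hstep, List.mem_cons]
    constructor
    · rintro ((hz | ⟨rfl, hp⟩) | ⟨hz, hp⟩) <;> tauto
    · rintro (hz | ⟨(rfl | hz), hp⟩) <;> tauto

theorem nodup_foldl_condAdd (p : Int → Bool) (l : List Int) (s : PySem.Set Int) (hs : s.Nodup) :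
    (l.foldl (fun acc i => if !(PySem.Set.contains acc i) && p i then PySem.Set.add acc i else acc) s).Nodup := by
  induction l generalizing s with
  | nil => exact hs
  | cons h t ih =>
    simp only [List.foldl_cons]
    apply ih
    split
    · exact PySem.Set.nodup_add s h hs
    · exact hs

theorem dynFrames_eq (onset apex offset window_size sparse_rate : Int) :
    dynamic_select_frames onset apex offset window_size sparse_rate
      = dynamic_select_frames_alt onset apex offset window_size sparse_rate := by
  unfold dynamic_select_frames dynamic_select_frames_alt
  apply PySem.List.sorted_eq_of_perm_of_pairwise_lt
  · -- the filtered range is a permutation of A's set: both nodup, same members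
    rw [List.perm_ext_iff_of_nodup]
    · intro y
      rw [List.mem_filter, mem_foldl_condAdd]
      simp only [PySem.Set.mem_update, PySem.Set.empty, List.not_mem_nil,
        PySem.List.mem_pyRange_one, false_or, Bool.or_eq_true, decide_eq_true_eq, abs_le]
      by_cases hm : (PySem.Int.mod (y - onset) sparse_rate == 0) = true
      · simp only [hm, and_true, or_true]
        omega
      · simp only [eq_false hm, and_false, or_false]
        omega
    · exact List.Nodup.filter _ (PySem.List.nodup_pyRange_one _ _)
    · apply nodup_foldl_condAdd
      apply PySem.Set.nodup_update
      apply PySem.Set.nodup_update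
      apply PySem.Set.nodup_update
      exact List.nodup_nil
  · exact List.Pairwise.filter _ (PySem.List.pairwise_lt_pyRange_one _ _)

-- ===== VERDICT (by name: the statement is the Claim_ definition above) =====
theorem dynamic_select_frames_spec : Claim_equal_dynamic_select_frames := by
  intro onset apex offset window_size sparse_rate _ _
  exact dynFrames_eq onset apex offset window_size sparse_rate
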